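-- pv_equiv track=rewrite | github.com/sjbrun/station-data-analysis | Generic/mask_sorting.py | sort_outage_on
-- ===== SOURCE A (Python) =====
-- def sort_outage_on(mask_list):
-- ## masks (modes) sorting function if outage is ON
--     master = []
--     most_on = 0
--     masks_copy = [m[:-1] for m in mask_list]
--     ## find mask with mosts 1's
--     for m in masks_copy:
--         num_on = m.count('1')
--         if num_on > most_on:
--             most_on = num_on ## most on boards that are not outage
--     ## start with single modes and move to multimodes
--     for num in range(1, most_on+1):
--         level = [] ## holds level of modes
--         for m in mask_list.copy():
--             mask = m[:-1]
--             if mask.count('1') == num: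
--                 level.append(m)
--                 mask_list.remove(m)
--         level.sort(reverse=True)
--         master.extend(level)
--     return master
-- ===== SOURCE B (Python) =====
-- def sort_outage_on(mask_list):
--     ## single pass: bucket masks by count of 1's (excluding last char), then
--     ## emit levels 1..max, each sorted in reverse.
--     ## NOTE: unlike the original, this does not mutate mask_list; the
--     ## equivalence claimed is about the return value only.
--     buckets = {}
--     maxc = 0
--     for m in mask_list:
--         c = m[:-1].count('1')
--         if c > 0:
--             buckets.setdefault(c, []).append(m)
--             if c > maxc:
--                 maxc = c
--     out = []
--     for num in range(1, maxc + 1):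
--         out.extend(sorted(buckets.get(num, []), reverse=True))
--     return out
-- ===== Notes on version B (the rewrite author's own statement) =====
-- stated objective: alternative
-- what changed: B replaces A's per-level rescans of a shrinking list with list.remove by a single pass that buckets masks into a dict keyed by ones-count while tracking the max count, then concatenates each bucket sorted in reverse for levels 1..max; B does not mutate its argument (A empties the matched masks out of mask_list), the equivalence is about the return value.
import Mathlib
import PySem

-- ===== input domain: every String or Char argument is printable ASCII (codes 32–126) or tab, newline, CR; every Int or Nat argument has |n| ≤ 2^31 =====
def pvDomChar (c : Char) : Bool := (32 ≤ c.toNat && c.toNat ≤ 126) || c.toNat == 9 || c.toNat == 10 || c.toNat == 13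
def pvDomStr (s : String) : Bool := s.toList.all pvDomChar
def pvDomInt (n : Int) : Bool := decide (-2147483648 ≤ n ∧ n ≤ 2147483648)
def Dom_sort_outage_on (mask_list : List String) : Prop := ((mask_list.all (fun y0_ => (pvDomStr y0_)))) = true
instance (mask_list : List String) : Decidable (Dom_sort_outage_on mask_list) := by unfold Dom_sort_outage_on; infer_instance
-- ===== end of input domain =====

-- B replaces A's repeated scan-and-remove passes (one pass per ones-level) by a single
-- grouping pass into a dict of buckets; equivalence is about the RETURN value only:
-- A empties the matched masks out of its argument list, B does not mutate it.

-- shared helper: the Python expression  m[:-1].count('1')  (as an Int, both programs compute it)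
def pvCnt (m : String) : Int := (PySem.Str.count (PySem.Str.slice m none (some (-1))) "1" : Int)

-- ===== PORT A =====
def sort_outage_on (mask_list : List String) : List String :=
  -- masks_copy = [m[:-1] for m in mask_list]
  let masks_copy := mask_list.map (fun m => PySem.Str.slice m none (some (-1)))
  -- running maximum of m.count('1') over masks_copy
  let most_on : Int := masks_copy.foldl (fun most_on m =>
      let num_on : Int := (PySem.Str.count m "1" : Int)
      if num_on > most_on then num_on else most_on) 0
  -- for num in range(1, most_on+1): scan a copy of mask_list, remove matches, sort level, extend master
  let st := (PySem.List.pyRange 1 (most_on + 1)).foldl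
    (fun (st : List String × List String) num =>
      let inner := st.2.foldl
        (fun (st2 : List String × List String) m =>
          if pvCnt m = num then  -- mask = m[:-1]; mask.count('1') == num
            -- mask_list.remove(m): m is drawn from a copy of the current list, so remove? never fails
            (st2.1 ++ [m], (PySem.List.remove? st2.2 m).getD st2.2)
          else st2) ([], st.2)
      (st.1 ++ PySem.List.sorted inner.1 (fun x => x) true, inner.2))
    ([], mask_list)
  st.1

-- ===== PORT B =====
def sort_outage_on_alt (mask_list : List String) : List String :=
  -- one pass: bucket each mask under its ones-count (if positive), tracking the max count
  let st := mask_list.foldl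
    (fun (st : PySem.Dict Int (List String) × Int) m =>
      let c : Int := pvCnt m
      if c > 0 then
        (st.1.modify c [] (fun b => b ++ [m]), if c > st.2 then c else st.2)
      else st)
    (PySem.Dict.empty, 0)
  -- for num in range(1, maxc+1): out.extend(sorted(buckets.get(num, []), reverse=True))
  (PySem.List.pyRange 1 (st.2 + 1)).foldl
    (fun out num => out ++ PySem.List.sorted (st.1.getD num []) (fun x => x) true) []

-- ===== PRECONDITION & SPEC =====
def Spec_sort_outage_on (mask_list : List String) (out : List String) : Prop := out = sort_outage_on_alt mask_list
instance (mask_list : List String) (out : List String) : Decidable (Spec_sort_outage_on mask_list out) := by unfold Spec_sort_outage_on; infer_instance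

-- ===== CLAIM (what is proved, stated in full; the proofs are below) =====
def Claim_equal_sort_outage_on : Prop := ∀ (mask_list : List String), Dom_sort_outage_on mask_list → Spec_sort_outage_on mask_list (sort_outage_on mask_list)

-- ===== LEMMAS AND PROOFS =====

theorem pvCnt_nonneg (m : String) : 0 ≤ pvCnt m := by
  simp [pvCnt]

-- A's first loop over the pre-sliced copies is the running max of pvCnt over the originals
theorem pv_maxA_eq (l : List String) (acc : Int) :
    (l.map (fun m => PySem.Str.slice m none (some (-1)))).foldl (fun most_on m =>
      let num_on : Int := (PySem.Str.count m "1" : Int)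
      if num_on > most_on then num_on else most_on) acc
    = l.foldl (fun most m => if pvCnt m > most then pvCnt m else most) acc := by
  rw [List.foldl_map]; rfl

theorem pv_max_nonneg (l : List String) (acc : Int) (h : 0 ≤ acc) :
    0 ≤ l.foldl (fun most m => if pvCnt m > most then pvCnt m else most) acc := by
  induction l generalizing acc with
  | nil => exact h
  | cons m t ih =>
    simp only [List.foldl_cons]
    split_ifs with hc
    · exact ih _ (pvCnt_nonneg m)
    · exact ih _ h

theorem pv_remove?_append (pre t : List String) (v : String) (hv : v ∉ pre) :
    PySem.List.remove? (pre ++ v :: t) v = some (pre ++ t) := by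
  induction pre with
  | nil => simp [PySem.List.remove?_cons_self]
  | cons x xs ih =>
    have hxv : x ≠ v := by intro h; exact hv (by simp [h])
    have hv' : v ∉ xs := fun h => hv (by simp [h])
    rw [List.cons_append, PySem.List.remove?_cons_of_ne _ hxv, ih hv']
    rfl

-- A's inner scan-and-remove pass: collects the masks of the current level in order,
-- and leaves exactly the non-matching masks.
theorem pv_inner_loop (num : Int) (l pre level : List String)
    (hpre : ∀ x ∈ pre, pvCnt x ≠ num) :
    l.foldl (fun (st2 : List String × List String) m =>
        if pvCnt m = num then
          (st2.1 ++ [m], (PySem.List.remove? st2.2 m).getD st2.2)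
        else st2) (level, pre ++ l)
    = (level ++ l.filter (fun m => decide (pvCnt m = num)),
       pre ++ l.filter (fun m => decide (¬ pvCnt m = num))) := by
  induction l generalizing pre level with
  | nil => simp
  | cons m t ih =>
    by_cases hm : pvCnt m = num
    · have hnp : m ∉ pre := fun h => hpre m h hm
      simp only [List.foldl_cons, if_pos hm, pv_remove?_append pre t m hnp, Option.getD_some]
      rw [ih pre (level ++ [m]) hpre]
      simp [hm]
    · simp only [List.foldl_cons, if_neg hm]
      have : pre ++ m :: t = (pre ++ [m]) ++ t := by simp
      rw [this, ih (pre ++ [m]) level (by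
        intro x hx
        rcases List.mem_append.mp hx with h | h
        · exact hpre x h
        · simp at h; subst h; exact hm)]
      simp [hm]

-- A's outer loop over a contiguous range of levels equals the per-level filters of the
-- list it starts from (each later level is unaffected by earlier removals).
theorem pv_outer_loop (n : Nat) (a : Int) (master cur : List String) :
    ((PySem.List.pyRange a (a + n)).foldl
      (fun (st : List String × List String) num =>
        let inner := st.2.foldl
          (fun (st2 : List String × List String) m =>
            if pvCnt m = num then
              (st2.1 ++ [m], (PySem.List.remove? st2.2 m).getD st2.2)
            else st2) ([], st.2)
        (st.1 ++ PySem.List.sorted inner.1 (fun x => x) true, inner.2))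
      (master, cur)).1
    = master ++ (PySem.List.pyRange a (a + n)).flatMap
        (fun num => PySem.List.sorted (cur.filter (fun m => decide (pvCnt m = num))) (fun x => x) true) := by
  induction n generalizing a master cur with
  | zero =>
    have h : PySem.List.pyRange a (a + (0:Nat)) = [] := by
      have : ∀ x, x ∉ PySem.List.pyRange a (a + (0:Nat)) := by
        intro x hx
        have := PySem.List.mem_pyRange_one.mp hx
        omega
      exact List.eq_nil_iff_forall_not_mem.mpr this
    rw [h]; simp
  | succ k ih =>
    have hc : PySem.List.pyRange a (a + (k+1:Nat)) = a :: PySem.List.pyRange (a+1) ((a+1) + k) := by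
      have he : a + ((k+1 : Nat) : Int) = (a+1) + (k : Int) := by push_cast; ring
      rw [he, PySem.List.pyRange_one_cons (by omega)]
    rw [hc]
    simp only [List.foldl_cons]
    have hin := pv_inner_loop a cur [] [] (by simp)
    simp only [List.nil_append] at hin
    rw [hin]
    dsimp only
    rw [ih (a+1) _ _]
    rw [List.flatMap_cons, ← List.append_assoc]
    congr 1
    apply List.flatMap_congr
    intro num hnum
    have hna : a + 1 ≤ num := (PySem.List.mem_pyRange_one.mp hnum).1
    congr 1
    rw [List.filter_filter]
    apply List.filter_congr
    intro x _
    by_cases hx : pvCnt x = num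
    · simp [hx]; omega
    · simp [hx]

-- B's grouping pass: bucket `n ≥ 1` holds exactly the masks of ones-count n, in order.
theorem pv_bucket (l : List String) (d : PySem.Dict Int (List String)) (acc : Int)
    (n : Int) (hn : 1 ≤ n) :
    ((l.foldl (fun (st : PySem.Dict Int (List String) × Int) m =>
        let c : Int := pvCnt m
        if c > 0 then
          (st.1.modify c [] (fun b => b ++ [m]), if c > st.2 then c else st.2)
        else st) (d, acc)).1).getD n []
    = d.getD n [] ++ l.filter (fun m => decide (pvCnt m = n)) := by
  induction l generalizing d acc with
  | nil => simp
  | cons m t ih =>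
    simp only [List.foldl_cons]
    by_cases hc : pvCnt m > 0
    · simp only [if_pos hc]
      rw [ih]
      rw [PySem.Dict.getD_modify]
      by_cases he : n = pvCnt m
      · simp [he]
      · have : ¬ pvCnt m = n := fun h => he h.symm
        simp [if_neg he, this]
    · simp only [if_neg hc]
      rw [ih]
      have : ¬ pvCnt m = n := by omega
      simp [this]

-- B's running max equals A's running max (skipping counts ≤ 0 cannot change a max ≥ 0).
theorem pv_bmax (l : List String) (d : PySem.Dict Int (List String)) (acc : Int) (h : 0 ≤ acc) :
    (l.foldl (fun (st : PySem.Dict Int (List String) × Int) m =>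
        let c : Int := pvCnt m
        if c > 0 then
          (st.1.modify c [] (fun b => b ++ [m]), if c > st.2 then c else st.2)
        else st) (d, acc)).2
    = l.foldl (fun most m => if pvCnt m > most then pvCnt m else most) acc := by
  induction l generalizing d acc with
  | nil => rfl
  | cons m t ih =>
    simp only [List.foldl_cons]
    by_cases hc : pvCnt m > 0
    · rw [if_pos hc]
      have hp : 0 ≤ (if pvCnt m > acc then pvCnt m else acc) := by split_ifs with h2 <;> omega
      exact ih _ _ hp
    · rw [if_neg hc, if_neg (by omega : ¬ pvCnt m > acc)]
      exact ih d acc h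

theorem pv_empty_getD (n : Int) : (PySem.Dict.empty : PySem.Dict Int (List String)).getD n [] = [] := by
  simp [PySem.Dict.getD, PySem.Dict.get?, PySem.Dict.empty]

-- ===== VERDICT (by name: the statement is the Claim_ definition above) =====
theorem sort_outage_on_spec : Claim_equal_sort_outage_on := by
  intro l _
  unfold Spec_sort_outage_on sort_outage_on sort_outage_on_alt
  simp only [pv_maxA_eq]
  set M : Int := l.foldl (fun most m => if pvCnt m > most then pvCnt m else most) 0 with hM
  have hM0 : 0 ≤ M := pv_max_nonneg l 0 le_rfl
  have hMr : M + 1 = 1 + ((M.toNat : Int)) := by omega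
  rw [pv_bmax l _ 0 le_rfl, ← hM, hMr]
  rw [pv_outer_loop M.toNat 1 [] l]
  rw [PySem.List.foldl_append_eq_flatMap]
  simp only [List.nil_append]
  apply List.flatMap_congr
  intro num hnum
  have h1 : 1 ≤ num := (PySem.List.mem_pyRange_one.mp hnum).1
  rw [pv_bucket l PySem.Dict.empty 0 num h1, pv_empty_getD]
  simp
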